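-- pv_equiv track=rewrite | github.com/Atul013/S4 | NPTEL Joy of Py/Week 9/3.py | hillvalley
-- ===== SOURCE A (Python) =====
-- def hillvalley(l):
--     # If the list is too short to form a valid hill or valley
--     if len(l) < 4:
--         return False
--
--     # Loop through each possible index where the list could transition from ascending to descending or vice versa
--     for i in range(1, len(l) - 1):
--         # Check for hill pattern: strictly increasing followed by strictly decreasing
--         # Check strictly increasing part
--         is_increasing = True
--         for j in range(i):
--             if l[j] >= l[j + 1]:
--                 is_increasing = False
--                 break
--
--         # Check strictly decreasing part
--         is_decreasing = True
--         for j in range(i, len(l) - 1):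
--             if l[j] <= l[j + 1]:
--                 is_decreasing = False
--                 break
--
--         # If both parts are valid, it's a hill
--         if is_increasing and is_decreasing:
--             return True
--
--         # Check for valley pattern: strictly decreasing followed by strictly increasing
--         # Check strictly decreasing part
--         is_decreasing = True
--         for j in range(i):
--             if l[j] <= l[j + 1]:
--                 is_decreasing = False
--                 break
--
--         # Check strictly increasing part
--         is_increasing = True
--         for j in range(i, len(l) - 1):
--             if l[j] >= l[j + 1]:
--                 is_increasing = False
--                 break
--
--         # If both parts are valid, it's a valley
--         if is_decreasing and is_increasing:
--             return True
--
--     # If no valid hill or valley pattern is found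
--     return False
-- ===== SOURCE B (Python) =====
-- def hillvalley(l):
--     # Single pass: walk the longest strict run from the left, then the opposite
--     # run; the list is a hill/valley iff the two runs cover it and are non-empty.
--     n = len(l)
--     if n < 4:
--         return False
--     # hill: strictly increasing prefix, then strictly decreasing to the end
--     p = 0
--     while p + 1 < n and l[p] < l[p + 1]:
--         p += 1
--     i = p
--     while i + 1 < n and l[i] > l[i + 1]:
--         i += 1
--     if i == n - 1 and 0 < p < n - 1:
--         return True
--     # valley: strictly decreasing prefix, then strictly increasing to the end
--     q = 0
--     while q + 1 < n and l[q] > l[q + 1]: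
--         q += 1
--     j = q
--     while j + 1 < n and l[j] < l[j + 1]:
--         j += 1
--     return j == n - 1 and 0 < q < n - 1
-- ===== Notes on version B (the rewrite author's own statement) =====
-- stated objective: faster
-- what changed: Replaced the outer scan over every candidate peak index with nested full rescans by a single left-to-right walk of the strict increasing/decreasing runs, checking they cover the list.
import Mathlib
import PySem

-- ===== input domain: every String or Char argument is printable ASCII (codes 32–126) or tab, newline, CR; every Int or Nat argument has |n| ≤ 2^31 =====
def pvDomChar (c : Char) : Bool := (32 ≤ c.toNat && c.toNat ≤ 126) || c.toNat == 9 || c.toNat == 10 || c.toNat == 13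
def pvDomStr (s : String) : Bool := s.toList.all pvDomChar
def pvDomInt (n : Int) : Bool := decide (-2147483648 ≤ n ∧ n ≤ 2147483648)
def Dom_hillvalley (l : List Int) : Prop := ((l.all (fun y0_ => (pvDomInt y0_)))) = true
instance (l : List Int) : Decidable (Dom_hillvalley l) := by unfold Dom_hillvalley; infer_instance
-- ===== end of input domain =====

-- B replaces A's quadratic scan over every candidate peak (with full rescans) by one
-- linear walk of the strict runs; same return value everywhere (A is total).

-- ===== PORT A =====
-- A's indexing l[j] always has 0 ≤ j ≤ len(l)-2 when reached, so List.getD is exact there.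

-- "for j in range(j0, i): if l[j] >= l[j+1]: is_increasing = False; break" (result: is_increasing)
def hvAllLt (l : List Int) (j i : Nat) : Bool :=
  if j < i then
    if l.getD (j+1) 0 ≤ l.getD j 0 then false
    else hvAllLt l (j+1) i
  else true
termination_by i - j

-- "for j in range(j0, i): if l[j] <= l[j+1]: is_decreasing = False; break" (result: is_decreasing)
def hvAllGt (l : List Int) (j i : Nat) : Bool :=
  if j < i then
    if l.getD j 0 ≤ l.getD (j+1) 0 then false
    else hvAllGt l (j+1) i
  else true
termination_by i - j

-- "for i in range(1, len(l)-1): … return True …" ; stop = len(l)-1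
def hvLoop (l : List Int) (i stop : Nat) : Bool :=
  if i < stop then
    if hvAllLt l 0 i && hvAllGt l i stop then true
    else if hvAllGt l 0 i && hvAllLt l i stop then true
    else hvLoop l (i+1) stop
  else false
termination_by stop - i

def hillvalley (l : List Int) : Bool :=
  if l.length < 4 then false
  else hvLoop l 1 (l.length - 1)

-- ===== PORT B =====
-- "while p+1 < n and l[p] < l[p+1]: p += 1"
def hvClimbUp (l : List Int) (i : Nat) : Nat :=
  if h : i + 1 < l.length ∧ l.getD i 0 < l.getD (i+1) 0 then hvClimbUp l (i+1) else i
termination_by l.length - i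
decreasing_by omega

-- "while i+1 < n and l[i] > l[i+1]: i += 1"
def hvClimbDown (l : List Int) (i : Nat) : Nat :=
  if h : i + 1 < l.length ∧ l.getD (i+1) 0 < l.getD i 0 then hvClimbDown l (i+1) else i
termination_by l.length - i
decreasing_by omega

def hillvalley_alt (l : List Int) : Bool :=
  let n := l.length
  if n < 4 then false
  else
    let p := hvClimbUp l 0
    let i := hvClimbDown l p
    if i == n - 1 && decide (0 < p) && decide (p < n - 1) then true
    else
      let q := hvClimbDown l 0
      let j := hvClimbUp l q
      j == n - 1 && decide (0 < q) && decide (q < n - 1)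

-- ===== PRECONDITION & SPEC =====
def Spec_hillvalley (l : List Int) (out : Bool) : Prop := out = hillvalley_alt l
instance (l : List Int) (out : Bool) : Decidable (Spec_hillvalley l out) := by unfold Spec_hillvalley; infer_instance

-- ===== CLAIM (what is proved, stated in full; the proofs are below) =====
def Claim_equal_hillvalley : Prop := ∀ (l : List Int), Dom_hillvalley l → Spec_hillvalley l (hillvalley l)

-- ===== LEMMAS AND PROOFS =====

theorem hvAllLt_iff (l : List Int) (j i : Nat) :
    hvAllLt l j i = true ↔ ∀ k, j ≤ k → k < i → l.getD k 0 < l.getD (k+1) 0 := by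
  by_cases hji : j < i
  · by_cases hge : l.getD (j+1) 0 ≤ l.getD j 0
    · rw [hvAllLt]; simp only [if_pos hji, if_pos hge]
      constructor
      · intro h; cases h
      · intro h; exact absurd (h j le_rfl hji) (not_lt.mpr hge)
    · rw [hvAllLt]; simp only [if_pos hji, if_neg hge]
      rw [hvAllLt_iff l (j+1) i]
      constructor
      · intro h k hk1 hk2
        rcases Nat.eq_or_lt_of_le hk1 with rfl | hk1'
        · omega
        · exact h k hk1' hk2
      · intro h k hk1 hk2; exact h k (by omega) hk2
  · rw [hvAllLt]; simp only [if_neg hji]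
    exact ⟨fun _ k hk1 hk2 => absurd hk2 (by omega), fun _ => trivial⟩
termination_by i - j
decreasing_by omega

theorem hvAllGt_iff (l : List Int) (j i : Nat) :
    hvAllGt l j i = true ↔ ∀ k, j ≤ k → k < i → l.getD (k+1) 0 < l.getD k 0 := by
  by_cases hji : j < i
  · by_cases hge : l.getD j 0 ≤ l.getD (j+1) 0
    · rw [hvAllGt]; simp only [if_pos hji, if_pos hge]
      constructor
      · intro h; cases h
      · intro h; exact absurd (h j le_rfl hji) (not_lt.mpr hge)
    · rw [hvAllGt]; simp only [if_pos hji, if_neg hge]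
      rw [hvAllGt_iff l (j+1) i]
      constructor
      · intro h k hk1 hk2
        rcases Nat.eq_or_lt_of_le hk1 with rfl | hk1'
        · omega
        · exact h k hk1' hk2
      · intro h k hk1 hk2; exact h k (by omega) hk2
  · rw [hvAllGt]; simp only [if_neg hji]
    exact ⟨fun _ k hk1 hk2 => absurd hk2 (by omega), fun _ => trivial⟩
termination_by i - j
decreasing_by omega

theorem hvLoop_iff (l : List Int) (i stop : Nat) :
    hvLoop l i stop = true ↔
      ∃ k, i ≤ k ∧ k < stop ∧
        ((hvAllLt l 0 k = true ∧ hvAllGt l k stop = true) ∨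
         (hvAllGt l 0 k = true ∧ hvAllLt l k stop = true)) := by
  by_cases his : i < stop
  · by_cases hhill : (hvAllLt l 0 i && hvAllGt l i stop) = true
    · rw [hvLoop]; simp only [if_pos his, if_pos hhill]
      rw [Bool.and_eq_true] at hhill
      exact ⟨fun _ => ⟨i, le_rfl, his, Or.inl hhill⟩, fun _ => trivial⟩
    · by_cases hvall : (hvAllGt l 0 i && hvAllLt l i stop) = true
      · rw [hvLoop]; simp only [if_pos his, if_neg hhill, if_pos hvall]
        rw [Bool.and_eq_true] at hvall
        exact ⟨fun _ => ⟨i, le_rfl, his, Or.inr hvall⟩, fun _ => trivial⟩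
      · rw [hvLoop]; simp only [if_pos his, if_neg hhill, if_neg hvall]
        rw [hvLoop_iff l (i+1) stop]
        constructor
        · rintro ⟨k, hk1, hk2, hk3⟩; exact ⟨k, by omega, hk2, hk3⟩
        · rintro ⟨k, hk1, hk2, hk3⟩
          rcases Nat.eq_or_lt_of_le hk1 with rfl | hk1'
          · rw [Bool.and_eq_true, not_and_or] at hhill hvall
            rcases hk3 with ⟨h1, h2⟩ | ⟨h1, h2⟩
            · rcases hhill with h | h <;> simp [h1, h2] at h
            · rcases hvall with h | h <;> simp [h1, h2] at h
          · exact ⟨k, by omega, hk2, hk3⟩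
  · rw [hvLoop]; simp only [if_neg his]
    constructor
    · intro h; cases h
    · rintro ⟨k, hk1, hk2, _⟩; omega
termination_by stop - i
decreasing_by omega

theorem hvClimbUp_spec (l : List Int) (j : Nat) :
    j ≤ hvClimbUp l j ∧
    (∀ k, j ≤ k → k < hvClimbUp l j → l.getD k 0 < l.getD (k+1) 0) ∧
    ¬ (hvClimbUp l j + 1 < l.length ∧ l.getD (hvClimbUp l j) 0 < l.getD (hvClimbUp l j + 1) 0) := by
  by_cases h : j + 1 < l.length ∧ l.getD j 0 < l.getD (j+1) 0
  · rw [hvClimbUp]; simp only [dif_pos h]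
    have ih := hvClimbUp_spec l (j+1)
    refine ⟨by omega, ?_, ih.2.2⟩
    intro k hk1 hk2
    rcases Nat.eq_or_lt_of_le hk1 with rfl | hk1'
    · exact h.2
    · exact ih.2.1 k (by omega) hk2
  · rw [hvClimbUp]; simp only [dif_neg h]
    exact ⟨le_rfl, fun k hk1 hk2 => by omega, h⟩
termination_by l.length - j
decreasing_by omega

theorem hvClimbDown_spec (l : List Int) (j : Nat) :
    j ≤ hvClimbDown l j ∧
    (∀ k, j ≤ k → k < hvClimbDown l j → l.getD (k+1) 0 < l.getD k 0) ∧
    ¬ (hvClimbDown l j + 1 < l.length ∧ l.getD (hvClimbDown l j + 1) 0 < l.getD (hvClimbDown l j) 0) := by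
  by_cases h : j + 1 < l.length ∧ l.getD (j+1) 0 < l.getD j 0
  · rw [hvClimbDown]; simp only [dif_pos h]
    have ih := hvClimbDown_spec l (j+1)
    refine ⟨by omega, ?_, ih.2.2⟩
    intro k hk1 hk2
    rcases Nat.eq_or_lt_of_le hk1 with rfl | hk1'
    · exact h.2
    · exact ih.2.1 k (by omega) hk2
  · rw [hvClimbDown]; simp only [dif_neg h]
    exact ⟨le_rfl, fun k hk1 hk2 => by omega, h⟩
termination_by l.length - j
decreasing_by omega

theorem hvClimbUp_eq (l : List Int) (j m : Nat) (hjm : j ≤ m) (hm : m < l.length)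
    (hup : ∀ k, j ≤ k → k < m → l.getD k 0 < l.getD (k+1) 0)
    (hstop : ¬ (m + 1 < l.length ∧ l.getD m 0 < l.getD (m+1) 0)) :
    hvClimbUp l j = m := by
  by_cases h : j + 1 < l.length ∧ l.getD j 0 < l.getD (j+1) 0
  · rw [hvClimbUp]; simp only [dif_pos h]
    rcases Nat.eq_or_lt_of_le hjm with rfl | hjm'
    · exact absurd h hstop
    · exact hvClimbUp_eq l (j+1) m (by omega) hm (fun k hk1 hk2 => hup k (by omega) hk2) hstop
  · rw [hvClimbUp]; simp only [dif_neg h]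
    rcases Nat.eq_or_lt_of_le hjm with rfl | hjm'
    · rfl
    · exact absurd ⟨by omega, hup j le_rfl hjm'⟩ h
termination_by l.length - j
decreasing_by omega

theorem hvClimbDown_eq (l : List Int) (j m : Nat) (hjm : j ≤ m) (hm : m < l.length)
    (hdown : ∀ k, j ≤ k → k < m → l.getD (k+1) 0 < l.getD k 0)
    (hstop : ¬ (m + 1 < l.length ∧ l.getD (m+1) 0 < l.getD m 0)) :
    hvClimbDown l j = m := by
  by_cases h : j + 1 < l.length ∧ l.getD (j+1) 0 < l.getD j 0
  · rw [hvClimbDown]; simp only [dif_pos h]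
    rcases Nat.eq_or_lt_of_le hjm with rfl | hjm'
    · exact absurd h hstop
    · exact hvClimbDown_eq l (j+1) m (by omega) hm (fun k hk1 hk2 => hdown k (by omega) hk2) hstop
  · rw [hvClimbDown]; simp only [dif_neg h]
    rcases Nat.eq_or_lt_of_le hjm with rfl | hjm'
    · rfl
    · exact absurd ⟨by omega, hdown j le_rfl hjm'⟩ h
termination_by l.length - j
decreasing_by omega

-- B as a disjunction of its two run-checks
theorem hillvalley_alt_eq_or (l : List Int) (h4 : ¬ l.length < 4) :
    hillvalley_alt l = true ↔
      ((hvClimbDown l (hvClimbUp l 0) = l.length - 1 ∧ 0 < hvClimbUp l 0 ∧ hvClimbUp l 0 < l.length - 1) ∨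
       (hvClimbUp l (hvClimbDown l 0) = l.length - 1 ∧ 0 < hvClimbDown l 0 ∧ hvClimbDown l 0 < l.length - 1)) := by
  simp only [hillvalley_alt, if_neg h4]
  by_cases h : (hvClimbDown l (hvClimbUp l 0) == l.length - 1 && decide (0 < hvClimbUp l 0) && decide (hvClimbUp l 0 < l.length - 1)) = true
  · simp only [h, if_true]
    simp only [Bool.and_eq_true, beq_iff_eq, decide_eq_true_eq] at h
    exact ⟨fun _ => Or.inl ⟨h.1.1, h.1.2, h.2⟩, fun _ => trivial⟩
  · simp only [if_neg h]
    simp only [Bool.and_eq_true, beq_iff_eq, decide_eq_true_eq]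
    constructor
    · rintro ⟨⟨h1, h2⟩, h3⟩; exact Or.inr ⟨h1, h2, h3⟩
    · rintro (⟨h1, h2, h3⟩ | ⟨h1, h2, h3⟩)
      · exact absurd (by simp [h1, h2, h3]) h
      · exact ⟨⟨h1, h2⟩, h3⟩

theorem hillvalley_eq_alt (l : List Int) : hillvalley l = hillvalley_alt l := by
  by_cases h4 : l.length < 4
  · simp [hillvalley, hillvalley_alt, h4]
  · rw [Bool.eq_iff_iff]
    rw [hillvalley_alt_eq_or l h4]
    simp only [hillvalley, if_neg h4]
    rw [hvLoop_iff]
    constructor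
    · rintro ⟨k, hk1, hk2, hk3⟩
      rcases hk3 with ⟨hA, hB⟩ | ⟨hA, hB⟩
      · -- hill at k : B's first branch fires
        left
        rw [hvAllLt_iff] at hA
        rw [hvAllGt_iff] at hB
        have hup0 : hvClimbUp l 0 = k := by
          apply hvClimbUp_eq l 0 k (by omega) (by omega)
          · intro j hj1 hj2; exact hA j hj1 hj2
          · rintro ⟨_, hlt⟩
            exact absurd hlt (not_lt.mpr (le_of_lt (hB k le_rfl hk2)))
        have hdn : hvClimbDown l k = l.length - 1 := by
          apply hvClimbDown_eq l k (l.length - 1) (by omega) (by omega)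
          · intro j hj1 hj2; exact hB j hj1 hj2
          · rintro ⟨hbad, _⟩; omega
        rw [hup0]
        exact ⟨hdn, by omega, by omega⟩
      · -- valley at k : B's second branch fires
        right
        rw [hvAllGt_iff] at hA
        rw [hvAllLt_iff] at hB
        have hdn0 : hvClimbDown l 0 = k := by
          apply hvClimbDown_eq l 0 k (by omega) (by omega)
          · intro j hj1 hj2; exact hA j hj1 hj2
          · rintro ⟨_, hlt⟩
            exact absurd hlt (not_lt.mpr (le_of_lt (hB k le_rfl hk2)))
        have hup : hvClimbUp l k = l.length - 1 := by
          apply hvClimbUp_eq l k (l.length - 1) (by omega) (by omega)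
          · intro j hj1 hj2; exact hB j hj1 hj2
          · rintro ⟨hbad, _⟩; omega
        rw [hdn0]
        exact ⟨hup, by omega, by omega⟩
    · rintro (⟨h1, h2, h3⟩ | ⟨h1, h2, h3⟩)
      · -- B's hill run gives A a peak at p = hvClimbUp l 0
        refine ⟨hvClimbUp l 0, h2, h3, Or.inl ⟨?_, ?_⟩⟩
        · rw [hvAllLt_iff]
          intro k hk1 hk2; exact (hvClimbUp_spec l 0).2.1 k hk1 hk2
        · rw [hvAllGt_iff]
          intro k hk1 hk2
          have := (hvClimbDown_spec l (hvClimbUp l 0)).2.1 k hk1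
          rw [h1] at this
          exact this hk2
      · -- B's valley run gives A a pit at q = hvClimbDown l 0
        refine ⟨hvClimbDown l 0, h2, h3, Or.inr ⟨?_, ?_⟩⟩
        · rw [hvAllGt_iff]
          intro k hk1 hk2; exact (hvClimbDown_spec l 0).2.1 k hk1 hk2
        · rw [hvAllLt_iff]
          intro k hk1 hk2
          have := (hvClimbUp_spec l (hvClimbDown l 0)).2.1 k hk1
          rw [h1] at this
          exact this hk2

-- ===== VERDICT (by name: the statement is the Claim_ definition above) =====
theorem hillvalley_spec : Claim_equal_hillvalley := by
  intro l _
  exact hillvalley_eq_alt l
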